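-- pv_equiv track=rewrite | github.com/yttrium25/Prime-number-deep-learning | data/make_data5.0.py | composite_list
-- ===== SOURCE A (Python) =====
-- def composite_list(r, x): # xの倍数を取り除いた, 合成数の表の作成
--     item = []
--     if x == 0:
--         for i in range(r):
--             item.append(i)
--     else:
--         for i in range(r):
--             if i % x != 0:
--                 item.append(i)
--     return item
-- ===== SOURCE B (Python) =====
-- def composite_list(r, x):
--     if x == 0:
--         return list(range(r))
--     a = abs(x)
--     item = []
--     for start in range(0, r, a):
--         item.extend(range(start + 1, min(start + a, r)))
--     return item
-- ===== Notes on version B (the rewrite author's own statement) =====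
-- stated objective: faster
-- what changed: Instead of scanning range(r) and testing each element with a modulo, B generates the kept numbers directly: it walks the multiples of abs(x) with a stepped range and emits each gap (start+1 .. min(start+abs(x), r)-1) wholesale via list.extend, so no per-element divisibility test exists at all.
import Mathlib
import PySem

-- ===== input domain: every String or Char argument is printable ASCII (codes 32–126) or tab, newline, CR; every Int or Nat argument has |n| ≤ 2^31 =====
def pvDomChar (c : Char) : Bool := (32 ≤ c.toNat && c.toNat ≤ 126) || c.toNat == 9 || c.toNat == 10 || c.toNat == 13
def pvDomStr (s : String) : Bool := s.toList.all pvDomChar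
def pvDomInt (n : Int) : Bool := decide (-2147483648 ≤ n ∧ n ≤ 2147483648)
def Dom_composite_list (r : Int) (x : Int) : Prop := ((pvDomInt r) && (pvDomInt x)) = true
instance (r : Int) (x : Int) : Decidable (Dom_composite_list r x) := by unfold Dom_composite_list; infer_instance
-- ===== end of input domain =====

-- B generates the non-multiples of x directly, block by block between consecutive multiples of abs(x),
-- with no per-element divisibility test; a different algorithm of the same O(r) cost.
-- ===== PORT A =====
def composite_list (r : Int) (x : Int) : List Int :=
  if x = 0 then
    (PySem.List.pyRange 0 r 1).foldl (fun item i => item ++ [i]) []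
  else
    (PySem.List.pyRange 0 r 1).foldl
      (fun item i => if PySem.Int.mod i x ≠ 0 then item ++ [i] else item) []

-- ===== PORT B =====
def composite_list_alt (r : Int) (x : Int) : List Int :=
  if x = 0 then PySem.List.pyRange 0 r 1
  else
    (PySem.List.pyRange 0 r |x|).foldl
      (fun item s => item ++ PySem.List.pyRange (s + 1) (min (s + |x|) r) 1) []

-- ===== PRECONDITION & SPEC =====
def Spec_composite_list (r : Int) (x : Int) (out : List Int) : Prop := out = composite_list_alt r x
instance (r : Int) (x : Int) (out : List Int) : Decidable (Spec_composite_list r x out) := by unfold Spec_composite_list; infer_instance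

-- ===== CLAIM (what is proved, stated in full; the proofs are below) =====
def Claim_equal_composite_list : Prop := ∀ (r : Int) (x : Int), Dom_composite_list r x → Spec_composite_list r x (composite_list r x)

-- ===== LEMMAS AND PROOFS =====

-- unfold one step of a positive-step range (PySem only provides the step-1 cons lemma)
lemma pyRange_pos_cons (a b s : Int) (hs : 0 < s) (hab : a < b) :
    PySem.List.pyRange a b s = a :: PySem.List.pyRange (a + s) b s := by
  rw [PySem.List.pyRange_of_pos a b hs, PySem.List.pyRange_of_pos (a + s) b hs]
  have hstep : b - a + s - 1 = (b - (a + s) + s - 1) + 1 * s := by ring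
  have hn : ((b - a + s - 1) / s) = (b - (a + s) + s - 1) / s + 1 := by
    rw [hstep, Int.add_mul_ediv_right _ _ (by omega : s ≠ 0)]
  by_cases h2 : a + s < b
  · have hq : (0:Int) ≤ (b - (a + s) + s - 1) / s :=
      Int.ediv_nonneg (by omega) (by omega)
    rw [if_pos hab, if_pos h2, hn]
    have : ((b - (a + s) + s - 1) / s + 1).toNat = ((b - (a + s) + s - 1) / s).toNat + 1 := by omega
    rw [this, List.range_succ_eq_map, List.map_cons]
    simp only [Nat.cast_zero, mul_zero, add_zero, List.map_map]
    congr 1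
    apply List.map_congr_left
    intro k _
    simp only [Function.comp_apply, Nat.succ_eq_add_one]
    push_cast
    ring
  · -- a + s ≥ b : the tail is empty and the count is exactly 1
    have hq0 : (b - (a + s) + s - 1) / s = 0 := by
      have h1 : (0:Int) ≤ b - (a + s) + s - 1 := by omega
      have h2' : b - (a + s) + s - 1 < s := by omega
      exact Int.ediv_eq_zero_of_lt h1 h2'
    rw [if_pos hab, if_neg h2, hn, hq0]
    simp

-- the block decomposition equals the modulo filter, from any multiple s of |x| upward
lemma blocks_eq (x : Int) (hx : x ≠ 0) (r : Int) :
    ∀ n : Nat, ∀ s : Int, (r - s).toNat ≤ n → 0 ≤ s → |x| ∣ s →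
      (PySem.List.pyRange s r |x|).flatMap
          (fun t => PySem.List.pyRange (t + 1) (min (t + |x|) r) 1)
        = (PySem.List.pyRange s r 1).filter (fun i => decide (PySem.Int.mod i x ≠ 0)) := by
  have ha : (0:Int) < |x| := abs_pos.mpr hx
  intro n
  induction n with
  | zero =>
      intro s hle _ _
      have hrs : r ≤ s := by omega
      rw [PySem.List.pyRange_of_pos s r ha, if_neg (by omega), PySem.List.pyRange_one_eq_nil hrs]
      simp
  | succ n ih =>
      intro s hle hs0 hdvd
      by_cases hsr : s < r
      · have hxs : x ∣ s := (abs_dvd x s).mp hdvd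
        have hmodz : PySem.Int.mod s x = 0 := (PySem.Int.mod_eq_zero_iff_dvd s x).mpr hxs
        set m := min (s + |x|) r with hm
        have hsm : s < m := by omega
        have hmr : m ≤ r := by omega
        rw [pyRange_pos_cons s r |x| ha hsr, List.flatMap_cons,
            PySem.List.pyRange_one_append s m r (by omega) hmr, List.filter_append]
        have hblock : (PySem.List.pyRange s m 1).filter (fun i => decide (PySem.Int.mod i x ≠ 0))
            = PySem.List.pyRange (s + 1) m 1 := by
          rw [PySem.List.pyRange_one_cons hsm, List.filter_cons]
          simp only [hmodz, ne_eq, not_true_eq_false, decide_false, Bool.false_eq_true, if_false]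
          apply List.filter_eq_self.mpr
          intro i hi
          have hb := PySem.List.mem_pyRange_one.mp hi
          simp only [decide_eq_true_eq, ne_eq]
          intro hmod
          have hdvdi : x ∣ i := (PySem.Int.mod_eq_zero_iff_dvd i x).mp hmod
          have hdi : |x| ∣ (i - s) := by
            rw [abs_dvd]
            exact dvd_sub hdvdi hxs
          have h1 : 0 < i - s := by omega
          have h2 : i - s < |x| := by omega
          have := Int.le_of_dvd h1 hdi
          omega
        rw [hblock]
        congr 1
        by_cases hnext : s + |x| ≤ r
        · have hmx : m = s + |x| := by omega
          rw [hmx]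
          exact ih (s + |x|) (by omega) (by omega) (dvd_add hdvd dvd_rfl)
        · have hmx : m = r := by omega
          have hnil1 : PySem.List.pyRange (s + |x|) r |x| = [] := by
            rw [PySem.List.pyRange_of_pos _ _ ha, if_neg (by omega)]; simp
          rw [hmx, hnil1, PySem.List.pyRange_one_eq_nil (le_refl r)]
          simp
      · have hnil1 : PySem.List.pyRange s r |x| = [] := by
          rw [PySem.List.pyRange_of_pos _ _ ha, if_neg (by omega)]; simp
        rw [hnil1, PySem.List.pyRange_one_eq_nil (by omega)]
        simp

-- ===== VERDICT (by name: the statement is the Claim_ definition above) =====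
theorem composite_list_spec : Claim_equal_composite_list := by
  intro r x _
  unfold Spec_composite_list composite_list composite_list_alt
  by_cases hx : x = 0
  · subst hx
    rw [if_pos rfl, if_pos rfl, PySem.List.foldl_append_singleton_eq_self]
    simp
  · rw [if_neg hx, if_neg hx, PySem.List.foldl_append_ite_eq_filter,
        PySem.List.foldl_append_eq_flatMap]
    simp only [List.nil_append]
    exact (blocks_eq x hx r (r - 0).toNat 0 (le_refl _) (le_refl 0) (dvd_zero _)).symm
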